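-- pv_equiv track=rewrite | github.com/MohiuddinSohel/Leetcoding | amazonOAPreparation/OA.py | maxShip
-- ===== SOURCE A (Python) =====
-- def maxShip(weight):
--     if max(weight) == weight[-1]:
--         return 0
--     res = 0
--     curMax = 0
--     max_right = [0] * len(weight)
--     max_right[-1] = weight[-1]
--     for i in range(len(weight) - 2, -1, -1):
--         max_right[i] = max(max_right[i + 1], weight[i])
--
--     for i in range(len(weight)):
--         curMax = max(curMax, weight[i])
--         if curMax != weight[i]:
--             if (i <= len(weight) - 3 and max_right[i + 1] > weight[-1]) or i == len(weight) - 1: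
--                 res += 1
--                 curMax = 0
--     return res
-- ===== SOURCE B (Python) =====
-- def maxShip(weight):
--     last = weight[-1]
--     if max(weight) == last:
--         return 0
--     # largest index whose weight exceeds the last element
--     lastBig = max(j for j in range(len(weight)) if weight[j] > last)
--     # every index i < lastBig sees a bigger element to its right (before the end),
--     # indices lastBig..len-2 see none, and the final index always counts once
--     # (the running max has absorbed weight[lastBig] > weight[-1] by then)
--     res, m = 1, 0
--     for w in weight[:lastBig]:
--         if m > w:
--             res += 1
--             m = 0
--         else:
--             m = w
--     return res
-- ===== Notes on version B (the rewrite author's own statement) =====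
-- stated objective: simpler
-- what changed: B replaces A's O(n) suffix-maximum array and the full-length forward scan with one boundary index lastBig (the last position whose weight exceeds weight[-1]); it loops only over weight[:lastBig] with the per-index condition gone from the loop body, starting the count at 1 because the final index always contributes exactly one.
import Mathlib
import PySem

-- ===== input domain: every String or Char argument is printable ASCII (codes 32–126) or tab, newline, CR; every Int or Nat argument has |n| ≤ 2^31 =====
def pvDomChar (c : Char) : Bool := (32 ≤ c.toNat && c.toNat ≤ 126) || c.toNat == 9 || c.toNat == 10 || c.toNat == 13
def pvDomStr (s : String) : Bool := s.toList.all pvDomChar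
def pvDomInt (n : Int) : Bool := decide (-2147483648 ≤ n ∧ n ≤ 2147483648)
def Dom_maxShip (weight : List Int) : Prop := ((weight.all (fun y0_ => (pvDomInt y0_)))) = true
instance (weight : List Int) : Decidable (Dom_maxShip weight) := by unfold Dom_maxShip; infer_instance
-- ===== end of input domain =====

-- B drops A's O(n) suffix-maximum table for one boundary index lastBig and loops only over
-- the prefix weight[:lastBig], starting the count at 1 for the always-counted final index.

-- ===== PORT A =====
-- the backward loop building max_right (helper so the proofs can name it)
def pvMaxRight (weight : List Int) (wlast : Int) : List Int :=
  (PySem.List.pyRange ((weight.length : Int) - 2) (-1) (-1)).foldl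
    (fun mr i =>
      PySem.List.pySetD mr i (max (PySem.List.pyGetD mr (i + 1) 0) (PySem.List.pyGetD weight i 0)))
    (PySem.List.pySetD (List.replicate weight.length (0 : Int)) (-1) wlast)

-- the body of A's forward loop (state (res, curMax), loop variable i)
def pvAStep (weight : List Int) (mr : List Int) (wlast : Int) (st : Int × Int) (i : Int) : Int × Int :=
  let n : Int := weight.length
  let wi := PySem.List.pyGetD weight i 0
  let curMax := max st.2 wi
  if curMax ≠ wi then
    if (i ≤ n - 3 ∧ PySem.List.pyGetD mr (i + 1) 0 > wlast) ∨ i = n - 1 then (st.1 + 1, 0)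
    else (st.1, curMax)
  else (st.1, curMax)

def maxShip (weight : List Int) : Int :=
  match PySem.List.max? weight (fun x => x), PySem.List.pyGet? weight (-1) with
  | some mx, some wlast =>
    if mx = wlast then 0
    else
      ((PySem.List.pyRange 0 (weight.length : Int) 1).foldl
        (pvAStep weight (pvMaxRight weight wlast) wlast) ((0 : Int), (0 : Int))).1
  | _, _ => 0   -- Python raises on the empty list; excluded by Pre_maxShip

-- ===== PORT B =====
-- the body of B's loop over weight[:lastBig]
def pvBStep (st : Int × Int) (x : Int) : Int × Int :=
  if st.2 > x then (st.1 + 1, 0) else (st.1, x)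

def maxShip_alt (weight : List Int) : Int :=
  match PySem.List.pyGet? weight (-1) with
  | none => 0   -- Python raises on the empty list; excluded by Pre_maxShip
  | some last =>
    match PySem.List.max? weight (fun x => x) with
    | none => 0   -- Python raises on the empty list; excluded by Pre_maxShip
    | some mx =>
    if mx = last then 0
    else
      -- lastBig = max(j for j in range(len(weight)) if weight[j] > last)
      -- (the generator is nonempty here because max(weight) > last)
      match PySem.List.max?
          ((PySem.List.pyRange 0 (weight.length : Int) 1).filter
            (fun j => PySem.List.pyGetD weight j 0 > last)) (fun x => x) with
      | none => 0   -- unreachable under the guard above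
      | some lastBig =>
        -- res, m = 1, 0;  for w in weight[:lastBig]: …
        ((PySem.List.slice weight (some 0) (some lastBig)).foldl pvBStep ((1 : Int), (0 : Int))).1

-- ===== PRECONDITION & SPEC =====
-- Pre_ excludes only the empty list, on which Python A raises ValueError (max of empty sequence).
def Pre_maxShip (weight : List Int) : Prop := weight ≠ []
instance (weight : List Int) : Decidable (Pre_maxShip weight) := by unfold Pre_maxShip; infer_instance
def pvWitness_maxShip : List Int := [3, 1, 4, 1, 2]

def Spec_maxShip (weight : List Int) (out : Int) : Prop := out = maxShip_alt weight
instance (weight : List Int) (out : Int) : Decidable (Spec_maxShip weight out) := by unfold Spec_maxShip; infer_instance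

-- ===== CLAIM (what is proved, stated in full; the proofs are below) =====
def Claim_equal_maxShip : Prop := ∀ (weight : List Int), Dom_maxShip weight → Pre_maxShip weight → Spec_maxShip weight (maxShip weight)

-- ===== LEMMAS AND PROOFS =====

-- maximum of a nonempty suffix, structurally
def sufMaxL : List Int → Int
  | [] => 0
  | [x] => x
  | x :: y :: t => max x (sufMaxL (y :: t))

theorem sufMaxL_cons (x : Int) (l : List Int) (h : l ≠ []) :
    sufMaxL (x :: l) = max x (sufMaxL l) := by
  cases l with
  | nil => exact absurd rfl h
  | cons y t => rfl

theorem sufMaxL_spec (l : List Int) (h : l ≠ []) :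
    sufMaxL l ∈ l ∧ ∀ y ∈ l, y ≤ sufMaxL l := by
  induction l with
  | nil => exact absurd rfl h
  | cons x t ih =>
    cases t with
    | nil => simp [sufMaxL]
    | cons y s =>
      obtain ⟨hmem, hle⟩ := ih (by simp)
      rw [sufMaxL_cons x (y :: s) (by simp)]
      constructor
      · rcases max_choice x (sufMaxL (y :: s)) with hc | hc <;> rw [hc]
        · exact List.mem_cons_self
        · exact List.mem_cons_of_mem _ hmem
      · intro z hz
        rcases List.mem_cons.mp hz with rfl | hz
        · exact le_max_left _ _
        · exact le_trans (hle z hz) (le_max_right _ _)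

theorem sufMaxL_gt_iff (l : List Int) (c : Int) (h : l ≠ []) :
    c < sufMaxL l ↔ ∃ y ∈ l, c < y := by
  obtain ⟨hmem, hle⟩ := sufMaxL_spec l h
  constructor
  · intro hc; exact ⟨sufMaxL l, hmem, hc⟩
  · rintro ⟨y, hy, hc⟩; exact lt_of_lt_of_le hc (hle y hy)

theorem pySetD_neg_one {α : Type} (xs : List α) (v : α) (h : xs ≠ []) :
    PySem.List.pySetD xs (-1) v = xs.set (xs.length - 1) v := by
  have h1 : 0 < xs.length := List.length_pos_of_ne_nil h
  rw [PySem.List.pySetD, PySem.List.pySet?, PySem.List.pyIdx?]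
  rw [if_neg (by norm_num), if_pos (by omega)]
  norm_num

theorem foldl_pySetD_length (w : List Int) (l : List Int) :
    ∀ mr : List Int,
      (l.foldl (fun mr i =>
        PySem.List.pySetD mr i (max (PySem.List.pyGetD mr (i + 1) 0) (PySem.List.pyGetD w i 0))) mr).length
      = mr.length := by
  induction l with
  | nil => intro mr; rfl
  | cons x t ih =>
    intro mr
    rw [List.foldl_cons, ih, PySem.List.length_pySetD]

-- the backward loop really computes the suffix maxima
theorem pvMaxRight_inv (w : List Int) (wlast : Int) (hwl : w.getLast? = some wlast)
    (hN2 : 2 ≤ w.length) :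
    ∀ m : Nat, m ≤ w.length - 1 →
      ∀ k : Nat, w.length - 1 - m ≤ k → k < w.length →
        PySem.List.pyGetD
          (((List.range m).map (fun (j : Nat) => ((w.length : Int)) - 2 - (j : Int))).foldl
            (fun mr i =>
              PySem.List.pySetD mr i (max (PySem.List.pyGetD mr (i + 1) 0) (PySem.List.pyGetD w i 0)))
            (PySem.List.pySetD (List.replicate w.length (0 : Int)) (-1) wlast))
          (k : Int) 0 = sufMaxL (w.drop k) := by
  have hwne : w ≠ [] := by intro h; rw [h] at hN2; simp at hN2
  have hlast : w.getLast hwne = wlast := by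
    rw [List.getLast?_eq_some_getLast hwne] at hwl; exact Option.some.inj hwl
  have hrep : (List.replicate w.length (0 : Int)) ≠ [] := by
    simp [List.replicate_eq_nil_iff]; omega
  have hmr0 : PySem.List.pySetD (List.replicate w.length (0 : Int)) (-1) wlast
      = (List.replicate w.length (0 : Int)).set (w.length - 1) wlast := by
    rw [pySetD_neg_one _ _ hrep, List.length_replicate]
  intro m
  induction m with
  | zero =>
    intro _ k hk1 hk2
    have hk : k = w.length - 1 := by omega
    subst hk
    rw [List.range_zero, List.map_nil, List.foldl_nil, hmr0]
    have hlen : ((List.replicate w.length (0 : Int)).set (w.length - 1) wlast).length = w.length := by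
      simp
    rw [PySem.List.pyGetD_eq_getElem _ _ (by positivity) (by rw [hlen]; omega)]
    have hdrop : w.drop (w.length - 1) = [w[w.length - 1]'(by omega)] := by
      rw [List.drop_eq_getElem_cons (by omega)]
      congr 1
      have : w.length - 1 + 1 = w.length := by omega
      rw [this, List.drop_length]
    rw [hdrop]
    show _ = w[w.length - 1]'(by omega)
    have : w[w.length - 1]'(by omega) = wlast := by
      rw [← hlast, List.getLast_eq_getElem]
    rw [this]
    simp only [Int.toNat_natCast]
    exact List.getElem_set_self (by simp; omega)
  | succ m ih =>
    intro hm k hk1 hk2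
    have hm' : m ≤ w.length - 1 := by omega
    rw [List.range_succ, List.map_append, List.foldl_append]
    set mrm := ((List.range m).map (fun (j : Nat) => ((w.length : Int)) - 2 - (j : Int))).foldl
      (fun mr i =>
        PySem.List.pySetD mr i (max (PySem.List.pyGetD mr (i + 1) 0) (PySem.List.pyGetD w i 0)))
      (PySem.List.pySetD (List.replicate w.length (0 : Int)) (-1) wlast) with hmrm
    have hlen : mrm.length = w.length := by
      rw [hmrm, foldl_pySetD_length, PySem.List.length_pySetD, List.length_replicate]
    simp only [List.map_singleton, List.foldl_cons, List.foldl_nil]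
    have hi : ((w.length : Int)) - 2 - (m : Int) = ((w.length - 2 - m : Nat) : Int) := by
      omega
    have higet : ((w.length : Int)) - 2 - (m : Int) + 1 = ((w.length - 1 - m : Nat) : Int) := by
      omega
    -- the two reads
    have hread1 : PySem.List.pyGetD mrm (((w.length : Int)) - 2 - (m : Int) + 1) 0
        = sufMaxL (w.drop (w.length - 1 - m)) := by
      rw [higet]
      exact ih hm' (w.length - 1 - m) (by omega) (by omega)
    have hread2 : PySem.List.pyGetD w (((w.length : Int)) - 2 - (m : Int)) 0
        = w[w.length - 2 - m]'(by omega) := by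
      rw [hi, PySem.List.pyGetD_ofNat _ _ _ (by omega)]
    rw [hread1, hread2, hi]
    rw [PySem.List.pyGetD_pySetD_natCast _ _ _ _ _ (by omega)]
    by_cases hkk : k = w.length - 2 - m
    · rw [if_pos hkk, hkk]
      have hdropne : w.drop (w.length - 1 - m) ≠ [] := by
        intro h
        have := List.drop_eq_nil_iff.mp h
        omega
      have hdrop : w.drop (w.length - 2 - m)
          = w[w.length - 2 - m]'(by omega) :: w.drop (w.length - 1 - m) := by
        rw [List.drop_eq_getElem_cons (by omega)]
        have harg : w.length - 2 - m + 1 = w.length - 1 - m := by omega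
        rw [harg]
      rw [hdrop, sufMaxL_cons _ _ hdropne, max_comm]
    · rw [if_neg hkk]
      exact ih hm' k (by omega) hk2

theorem pvMaxRight_spec (w : List Int) (wlast : Int) (hwl : w.getLast? = some wlast)
    (hN2 : 2 ≤ w.length) :
    ∀ k : Nat, k < w.length →
      PySem.List.pyGetD (pvMaxRight w wlast) (k : Int) 0 = sufMaxL (w.drop k) := by
  intro k hk
  have hrange : PySem.List.pyRange ((w.length : Int) - 2) (-1) (-1)
      = (List.range (w.length - 1)).map (fun (j : Nat) => ((w.length : Int)) - 2 - (j : Int)) := by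
    rw [PySem.List.pyRange_neg_one]
    have hn : ((w.length : Int) - 2 - (-1)).toNat = w.length - 1 := by omega
    rw [hn]
  rw [pvMaxRight, hrange]
  exact pvMaxRight_inv w wlast hwl hN2 (w.length - 1) le_rfl k (by omega) hk

-- B's loop counts independently of the initial count
theorem pvBStep_shift (l : List Int) :
    ∀ (a m : Int),
      l.foldl pvBStep (a, m) = ((l.foldl pvBStep (0, m)).1 + a, (l.foldl pvBStep (0, m)).2) := by
  induction l with
  | nil => intro a m; simp
  | cons x t ih =>
    intro a m
    rw [List.foldl_cons, List.foldl_cons]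
    by_cases h : m > x
    · have e1 : pvBStep (a, m) x = (a + 1, 0) := by simp [pvBStep, h]
      have e2 : pvBStep (0, m) x = (1, 0) := by simp [pvBStep, h]
      rw [e1, e2, ih (a + 1) 0, ih 1 0]
      simp; ring
    · have e1 : pvBStep (a, m) x = (a, x) := by simp [pvBStep, h]
      have e2 : pvBStep (0, m) x = (0, x) := by simp [pvBStep, h]
      rw [e1, e2, ih a x]

-- A's forward-loop body with the condition rewritten through the boundary index L
def pvCStep (w : List Int) (L : Int) (st : Int × Int) (i : Int) : Int × Int :=
  let wi := PySem.List.pyGetD w i 0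
  let curMax := max st.2 wi
  if curMax ≠ wi then
    if i < L ∨ i = (w.length : Int) - 1 then (st.1 + 1, 0)
    else (st.1, curMax)
  else (st.1, curMax)

-- ===== VERDICT (by name: the statement is the Claim_ definition above) =====
theorem maxShip_spec : Claim_equal_maxShip := by
  intro w _ hw
  unfold Spec_maxShip
  have hN1 : 0 < w.length := List.length_pos_of_ne_nil hw
  obtain ⟨mx, hmx⟩ : ∃ mx, PySem.List.max? w (fun x => x) = some mx := by
    cases h : PySem.List.max? w (fun x => x) with
    | none => exact absurd ((PySem.List.max?_eq_none_iff _ _).mp h) hw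
    | some m => exact ⟨m, rfl⟩
  have hlastget : PySem.List.pyGet? w (-1) = some (w.getLast hw) := by
    rw [PySem.List.pyGet?_neg_one]; exact List.getLast?_eq_some_getLast hw
  set last := w.getLast hw with hlastdef
  rw [maxShip, maxShip_alt, hmx, hlastget]
  by_cases hml : mx = last
  · simp [hml]
  · simp only [if_neg hml]
    have hmxmem : mx ∈ w := PySem.List.max?_mem hmx
    have hmxmax : ∀ y ∈ w, y ≤ mx := PySem.List.max?_isMax hmx
    have hlastlt : last < mx :=
      lt_of_le_of_ne (hmxmax last (List.getLast_mem hw)) (fun h => hml h.symm)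
    have hN2 : 2 ≤ w.length := by
      by_contra h
      have h1 : w.length = 1 := by omega
      obtain ⟨a, rfl⟩ := List.length_eq_one_iff.mp h1
      have e1 : mx = a := by simpa using hmxmem
      have e2 : last = a := by simp [hlastdef, List.getLast]
      exact hml (by rw [e1, e2])
    have hwl : w.getLast? = some last := List.getLast?_eq_some_getLast hw
    -- the filtered index list is nonempty, so B's max? returns some L
    obtain ⟨ki, hki, hkiv⟩ := List.getElem_of_mem hmxmem
    have hkimem : (ki : Int) ∈ (PySem.List.pyRange 0 (w.length : Int) 1).filter
        (fun j => PySem.List.pyGetD w j 0 > last) := by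
      rw [List.mem_filter]
      refine ⟨PySem.List.mem_pyRange_one.mpr ⟨by positivity, by exact_mod_cast hki⟩, ?_⟩
      rw [PySem.List.pyGetD_ofNat _ _ _ hki, hkiv]
      simpa using hlastlt
    obtain ⟨L, hL⟩ : ∃ L, PySem.List.max?
        ((PySem.List.pyRange 0 (w.length : Int) 1).filter
          (fun j => PySem.List.pyGetD w j 0 > last)) (fun x => x) = some L := by
      cases h : PySem.List.max?
          ((PySem.List.pyRange 0 (w.length : Int) 1).filter
            (fun j => PySem.List.pyGetD w j 0 > last)) (fun x => x) with
      | none =>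
        rw [PySem.List.max?_eq_none_iff] at h
        rw [h] at hkimem
        exact absurd hkimem (List.not_mem_nil)
      | some L => exact ⟨L, rfl⟩
    rw [hL]
    -- facts about L
    have hLmem := PySem.List.max?_mem hL
    rw [List.mem_filter] at hLmem
    obtain ⟨hLrange, hLgt⟩ := hLmem
    obtain ⟨hL0, hLN⟩ := PySem.List.mem_pyRange_one.mp hLrange
    have hLmax : ∀ j ∈ (PySem.List.pyRange 0 (w.length : Int) 1).filter
        (fun j => PySem.List.pyGetD w j 0 > last), j ≤ L := PySem.List.max?_isMax hL
    have hBig : ∀ (j : Nat) (hj : j < w.length), last < w[j]'hj → (j : Int) ≤ L := by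
      intro j hj hgt
      refine hLmax (j : Int) ?_
      rw [List.mem_filter]
      refine ⟨PySem.List.mem_pyRange_one.mpr ⟨by positivity, by exact_mod_cast hj⟩, ?_⟩
      rw [PySem.List.pyGetD_ofNat _ _ _ hj]
      simpa using hgt
    have hLcast : ((L.toNat : Nat) : Int) = L := Int.toNat_of_nonneg hL0
    have hLnatN : L.toNat < w.length := by omega
    have hLval : last < w[L.toNat]'hLnatN := by
      have h1 : PySem.List.pyGetD w L 0 = w[L.toNat]'hLnatN :=
        PySem.List.pyGetD_eq_getElem w 0 hL0 (by exact_mod_cast hLN)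
      have h2 : last < PySem.List.pyGetD w L 0 := by simpa using hLgt
      rw [h1] at h2
      exact h2
    have hLne : L.toNat ≠ w.length - 1 := by
      intro h
      have hv := hLval
      simp only [h] at hv
      have hg : w.getLast hw = w[w.length - 1]'(by omega) := List.getLast_eq_getElem hw
      rw [hlastdef, hg] at hv
      exact lt_irrefl _ hv
    have hLle : L ≤ (w.length : Int) - 2 := by omega
    -- condition equivalence: A's suffix-max test is the boundary-index test
    have hcond : ∀ i : Int, 0 ≤ i → i < (w.length : Int) →
        (((i ≤ (w.length : Int) - 3 ∧
            PySem.List.pyGetD (pvMaxRight w last) (i + 1) 0 > last) ∨ i = (w.length : Int) - 1)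
          ↔ (i < L ∨ i = (w.length : Int) - 1)) := by
      intro i hi0 hiN
      by_cases hiN1 : i = (w.length : Int) - 1
      · simp [hiN1]
      · have hiN2 : i ≤ (w.length : Int) - 2 := by omega
        by_cases hii : i ≤ (w.length : Int) - 3
        · have hk : (((i.toNat + 1 : Nat)) : Int) = i + 1 := by omega
          have hkN : i.toNat + 1 < w.length := by omega
          have hdropne : w.drop (i.toNat + 1) ≠ [] := by
            intro h; have := List.drop_eq_nil_iff.mp h; omega
          have hsuff : PySem.List.pyGetD (pvMaxRight w last) (i + 1) 0
              = sufMaxL (w.drop (i.toNat + 1)) := by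
            rw [← hk]
            exact pvMaxRight_spec w last hwl hN2 (i.toNat + 1) hkN
          rw [hsuff]
          have hiff : last < sufMaxL (w.drop (i.toNat + 1)) ↔ i < L := by
            rw [sufMaxL_gt_iff _ _ hdropne]
            constructor
            · rintro ⟨y, hy, hgt⟩
              obtain ⟨j, hj, hjv⟩ := List.getElem_of_mem hy
              rw [List.getElem_drop] at hjv
              have hjlen : i.toNat + 1 + j < w.length := by
                have := hj; rw [List.length_drop] at this; omega
              have := hBig (i.toNat + 1 + j) hjlen (by rw [hjv]; exact hgt)
              omega
            · intro hiL
              refine ⟨w[L.toNat], ?_, hLval⟩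
              have hmem : w[L.toNat] ∈ w.drop (i.toNat + 1) := by
                have h1 : i.toNat + 1 ≤ L.toNat := by omega
                have h2 : L.toNat - (i.toNat + 1) < (w.drop (i.toNat + 1)).length := by
                  rw [List.length_drop]; omega
                have h3 : (w.drop (i.toNat + 1))[L.toNat - (i.toNat + 1)]'h2 = w[L.toNat] := by
                  rw [List.getElem_drop]
                  congr 1
                  omega
                rw [← h3]
                exact List.getElem_mem h2
              exact hmem
          constructor
          · rintro (⟨_, hgt⟩ | h)
            · exact Or.inl (hiff.mp hgt)
            · exact Or.inr h
          · rintro (hiL | h)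
            · exact Or.inl ⟨hii, hiff.mpr hiL⟩
            · exact Or.inr h
        · constructor
          · rintro (⟨h3, _⟩ | h)
            · exact absurd h3 hii
            · exact Or.inr h
          · rintro (hiL | h)
            · omega
            · exact Or.inr h
    -- A's loop equals the rewritten loop
    have hstep1 : (PySem.List.pyRange 0 (w.length : Int) 1).foldl
        (pvAStep w (pvMaxRight w last) last) ((0 : Int), (0 : Int))
        = (PySem.List.pyRange 0 (w.length : Int) 1).foldl (pvCStep w L) ((0 : Int), (0 : Int)) := by
      apply PySem.List.foldl_congr_mem
      intro st i hi
      obtain ⟨hi0, hiN⟩ := PySem.List.mem_pyRange_one.mp hi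
      simp only [pvAStep, pvCStep]
      by_cases hne : max st.2 (PySem.List.pyGetD w i 0) ≠ PySem.List.pyGetD w i 0
      · simp only [if_pos hne]
        exact if_congr (hcond i hi0 hiN) rfl rfl
      · simp only [if_neg hne]
    rw [hstep1]
    -- split the loop at L and at length-1
    have hsplit : PySem.List.pyRange 0 (w.length : Int) 1
        = (PySem.List.pyRange 0 L 1 ++ PySem.List.pyRange L ((w.length : Int) - 1) 1)
          ++ PySem.List.pyRange ((w.length : Int) - 1) (w.length : Int) 1 := by
      rw [List.append_assoc,
          ← PySem.List.pyRange_one_append L ((w.length : Int) - 1) (w.length : Int) (by omega) (by omega),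
          ← PySem.List.pyRange_one_append 0 L (w.length : Int) (by omega) (by omega)]
    rw [hsplit, List.foldl_append, List.foldl_append]
    -- phase 1: before L the rewritten loop is B's loop over weight[:lastBig]
    have hph1 : List.foldl (pvCStep w L) ((0 : Int), (0 : Int)) (PySem.List.pyRange 0 L 1)
        = List.foldl pvBStep ((0 : Int), (0 : Int)) (w.take L.toNat) := by
      have hstepeq : ∀ (st : Int × Int), ∀ i ∈ PySem.List.pyRange 0 L 1,
          pvCStep w L st i = pvBStep st (PySem.List.pyGetD w i 0) := by
        intro st i hi
        obtain ⟨hi0, hiL⟩ := PySem.List.mem_pyRange_one.mp hi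
        simp only [pvCStep, pvBStep]
        by_cases hgt : st.2 > PySem.List.pyGetD w i 0
        · rw [max_eq_left hgt.le, if_pos (ne_of_gt hgt), if_pos (Or.inl hiL), if_pos hgt]
        · rw [not_lt] at hgt
          rw [max_eq_right hgt, if_neg (fun h => h rfl), if_neg (not_lt.mpr hgt)]
      rw [PySem.List.foldl_congr_mem _ _ _ _ hstepeq]
      have htake : ∀ (st : Int × Int), ∀ j ∈ PySem.List.pyRange 0 L 1,
          pvBStep st (PySem.List.pyGetD w j 0) = pvBStep st (PySem.List.pyGetD (w.take L.toNat) j 0) := by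
        intro st j hj
        obtain ⟨hj0, hjL⟩ := PySem.List.mem_pyRange_one.mp hj
        have h1 : PySem.List.pyGetD w j 0 = w[j.toNat]'(by omega) :=
          PySem.List.pyGetD_eq_getElem _ _ hj0 (by omega)
        have h2 : PySem.List.pyGetD (w.take L.toNat) j 0
            = (w.take L.toNat)[j.toNat]'(by rw [List.length_take]; omega) :=
          PySem.List.pyGetD_eq_getElem _ _ hj0 (by rw [List.length_take]; omega)
        rw [h1, h2, List.getElem_take]
      rw [PySem.List.foldl_congr_mem _ _ _ _ htake]
      have hlen : PySem.List.len (w.take L.toNat) = L := by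
        rw [PySem.List.len, List.length_take]
        omega
      have hfin := PySem.List.foldl_pyRange_zero_pyGetD (w.take L.toNat) 0 pvBStep
        ((0 : Int), (0 : Int))
      rw [hlen] at hfin
      exact hfin
    rw [hph1]
    set s1 := List.foldl pvBStep ((0 : Int), (0 : Int)) (w.take L.toNat) with hs1
    -- phase 2: between L and length-1 only the running max changes
    have hph2 : List.foldl (pvCStep w L) s1 (PySem.List.pyRange L ((w.length : Int) - 1) 1)
        = (s1.1, List.foldl (fun c i => max c (PySem.List.pyGetD w i 0)) s1.2
            (PySem.List.pyRange L ((w.length : Int) - 1) 1)) := by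
      have hstepeq : ∀ (st : Int × Int), ∀ i ∈ PySem.List.pyRange L ((w.length : Int) - 1) 1,
          pvCStep w L st i = (st.1, max st.2 (PySem.List.pyGetD w i 0)) := by
        intro st i hi
        obtain ⟨hiL, hiN1⟩ := PySem.List.mem_pyRange_one.mp hi
        simp only [pvCStep]
        have hc : ¬ (i < L ∨ i = (w.length : Int) - 1) := by omega
        by_cases hne : max st.2 (PySem.List.pyGetD w i 0) ≠ PySem.List.pyGetD w i 0
        · rw [if_pos hne, if_neg hc]
        · rw [if_neg hne]
      rw [PySem.List.foldl_congr_mem _ _ _ _ hstepeq]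
      rw [show s1 = (s1.1, s1.2) from rfl]
      rw [PySem.List.foldl_prod_mk (fun (a : Int) (_ : Int) => a)
        (fun c i => max c (PySem.List.pyGetD w i 0))]
      rw [PySem.List.foldl_ignore]
    rw [hph2]
    set c2 := List.foldl (fun c i => max c (PySem.List.pyGetD w i 0)) s1.2
      (PySem.List.pyRange L ((w.length : Int) - 1) 1) with hc2def
    have hc2 : last < c2 := by
      have hmem : L ∈ PySem.List.pyRange L ((w.length : Int) - 1) 1 :=
        PySem.List.mem_pyRange_one.mpr ⟨le_rfl, by omega⟩
      have hb := (PySem.List.le_foldl_max_int (PySem.List.pyRange L ((w.length : Int) - 1) 1)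
        (fun i => PySem.List.pyGetD w i 0) s1.2).2 L hmem
      have hv : last < PySem.List.pyGetD w L 0 := by simpa using hLgt
      exact lt_of_lt_of_le hv hb
    -- phase 3: the last index always counts
    have hlast3 : PySem.List.pyRange ((w.length : Int) - 1) (w.length : Int) 1
        = [(w.length : Int) - 1] := by
      rw [PySem.List.pyRange_one_cons (by omega), PySem.List.pyRange_one_eq_nil (by omega)]
    rw [hlast3, List.foldl_cons, List.foldl_nil]
    have hwilast : PySem.List.pyGetD w ((w.length : Int) - 1) 0 = last := by
      have hcast : ((w.length - 1 : Nat) : Int) = (w.length : Int) - 1 := by omega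
      rw [← hcast, PySem.List.pyGetD_ofNat _ _ _ (by omega), hlastdef, List.getLast_eq_getElem]
    have hstep3 : pvCStep w L (s1.1, c2) ((w.length : Int) - 1) = (s1.1 + 1, 0) := by
      simp only [pvCStep, hwilast]
      rw [max_eq_left hc2.le, if_pos (ne_of_gt hc2)]
      simp
    rw [hstep3]
    -- B's side: the match on `some L` reduces definitionally
    show (s1.1 + 1, (0 : Int)).1
        = (List.foldl pvBStep ((1 : Int), (0 : Int)) (PySem.List.slice w (some 0) (some L))).1
    have hslice : PySem.List.slice w (some 0) (some L) = w.take L.toNat := by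
      rw [PySem.List.slice_zero_start, PySem.List.slice_to _ hL0]
    rw [hslice, pvBStep_shift _ 1 0, ← hs1]
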